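-- pv_equiv track=rewrite | github.com/josepegea/linux_cfg | xkeysnail/shortcut_support.py | find_topmost_window
-- ===== SOURCE A (Python) =====
-- def find_topmost_window(best_windows, ordered_window_ids):
--     if not best_windows or not ordered_window_ids:
--         return None
--
--     reversed_ordered_window_ids = ordered_window_ids[::-1]
--     best_window_ids = [int(window, 16) for window in best_windows]
--
--     for window in reversed_ordered_window_ids:
--         if int(window, 16) in best_window_ids:
--             return window
--
--     return None
-- ===== SOURCE B (Python) =====
-- def find_topmost_window(best_windows, ordered_window_ids):
--     if not best_windows or not ordered_window_ids:
--         return None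
--
--     # position index: int value -> last index in the ordered list
--     pos = {int(window, 16): i for i, window in enumerate(ordered_window_ids)}
--
--     best_i = -1
--     for window in best_windows:
--         i = pos.get(int(window, 16), -1)
--         if i > best_i:
--             best_i = i
--
--     return ordered_window_ids[best_i] if best_i >= 0 else None
-- ===== Notes on version B (the rewrite author's own statement) =====
-- stated objective: alternative
-- what changed: Replaces the reversed-list scan with an inner 'in' membership test over all converted best ids by a single dict build (int value -> last ordered index) plus one pass over best_windows keeping the maximum index, returning the ordered entry at that index.
-- outside the precondition, e.g. on find_topmost_window(['1'], ['zz', '1']): A returns '1', B raises ValueError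
import Mathlib
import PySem

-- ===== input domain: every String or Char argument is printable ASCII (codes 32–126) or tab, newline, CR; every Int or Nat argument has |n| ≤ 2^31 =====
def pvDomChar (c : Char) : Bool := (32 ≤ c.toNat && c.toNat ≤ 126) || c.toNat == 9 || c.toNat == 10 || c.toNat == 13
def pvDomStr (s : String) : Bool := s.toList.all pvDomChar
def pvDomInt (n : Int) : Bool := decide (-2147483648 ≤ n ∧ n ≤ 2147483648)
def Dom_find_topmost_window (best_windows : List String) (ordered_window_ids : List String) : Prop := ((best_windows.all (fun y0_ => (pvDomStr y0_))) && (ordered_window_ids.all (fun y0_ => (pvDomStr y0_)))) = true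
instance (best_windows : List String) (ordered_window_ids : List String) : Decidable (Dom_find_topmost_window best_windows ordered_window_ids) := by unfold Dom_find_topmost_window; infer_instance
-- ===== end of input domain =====

-- B replaces A's reversed scan with an inner membership test by a position dict (value -> last ordered
-- index) plus one max-keeping pass over best_windows: an alternative single-pass-per-list algorithm.

-- int(w, 16); total stand-in: Pre_ keeps us where Python's int() succeeds
def pvHex (w : String) : Int := (PySem.Int.ofStrBase? w 16).getD 0

-- ===== PORT A =====
-- 'for window in reversed_ordered_window_ids: if int(window,16) in best_window_ids: return window'
def pvScanA : List String → List Int → Option String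
  | [], _ => none
  | w :: rest, ids => if ids.contains (pvHex w) then some w else pvScanA rest ids

def find_topmost_window (best_windows : List String) (ordered_window_ids : List String) : Option String :=
  if best_windows = [] ∨ ordered_window_ids = [] then none
  else
    let reversed_ordered_window_ids := (PySem.List.slice? ordered_window_ids none none (-1)).getD []
    let best_window_ids := best_windows.map pvHex
    pvScanA reversed_ordered_window_ids best_window_ids

-- ===== PORT B =====
-- pos = {int(window,16): i for i, window in enumerate(ordered_window_ids)}
def pvPosIndex (ordered_window_ids : List String) : PySem.Dict Int Int :=
  (PySem.List.enumerate ordered_window_ids 0).foldl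
    (fun d p => d.insert (pvHex p.2) p.1) PySem.Dict.empty

def find_topmost_window_alt (best_windows : List String) (ordered_window_ids : List String) : Option String :=
  if best_windows = [] ∨ ordered_window_ids = [] then none
  else
    let pos := pvPosIndex ordered_window_ids
    let best_i := best_windows.foldl
      (fun acc w => let i := pos.getD (pvHex w) (-1); if i > acc then i else acc) (-1)
    if best_i ≥ 0 then some (PySem.List.pyGetD ordered_window_ids best_i "") else none

-- ===== PRECONDITION & SPEC =====
-- Pre_ excludes the inputs where int(w,16) raises ValueError in either program: A parses all of
-- best_windows eagerly but ordered ids only until the first match, B parses all of both lists; on the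
-- excluded inputs where A still returns (a non-hex ordered entry behind the match) B itself raises.
def Pre_find_topmost_window (best_windows : List String) (ordered_window_ids : List String) : Prop :=
  best_windows = [] ∨ ordered_window_ids = [] ∨
    ((∀ w ∈ best_windows, (PySem.Int.ofStrBase? w 16).isSome) ∧
     (∀ w ∈ ordered_window_ids, (PySem.Int.ofStrBase? w 16).isSome))
instance (best_windows : List String) (ordered_window_ids : List String) : Decidable (Pre_find_topmost_window best_windows ordered_window_ids) := by unfold Pre_find_topmost_window; infer_instance

def pvWitness_find_topmost_window : List String × List String := (["a"], ["1", "a"])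

def Spec_find_topmost_window (best_windows : List String) (ordered_window_ids : List String) (out : Option String) : Prop := out = find_topmost_window_alt best_windows ordered_window_ids
instance (best_windows : List String) (ordered_window_ids : List String) (out : Option String) : Decidable (Spec_find_topmost_window best_windows ordered_window_ids out) := by unfold Spec_find_topmost_window; infer_instance

-- ===== CLAIM (what is proved, stated in full; the proofs are below) =====
def Claim_equal_find_topmost_window : Prop := ∀ (best_windows : List String) (ordered_window_ids : List String), Dom_find_topmost_window best_windows ordered_window_ids → Pre_find_topmost_window best_windows ordered_window_ids → Spec_find_topmost_window best_windows ordered_window_ids (find_topmost_window best_windows ordered_window_ids)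

-- ===== LEMMAS AND PROOFS =====

-- B's max-keeping fold, abstracted over the candidate score f
def pvMaxFold (f : String → Int) (l : List String) (a : Int) : Int :=
  l.foldl (fun acc w => if f w > acc then f w else acc) a

lemma pvMaxFold_const (f : String → Int) (l : List String) (a : Int)
    (h : ∀ w ∈ l, f w ≤ a) : pvMaxFold f l a = a := by
  induction l with
  | nil => rfl
  | cons hd tl ih =>
    simp only [pvMaxFold, List.foldl_cons] at *
    have : ¬ f hd > a := by have := h hd (by simp); omega
    simp only [if_neg this]
    exact ih (fun w hw => h w (by simp [hw]))

lemma pvMaxFold_lt (f : String → Int) (l : List String) (a U : Int)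
    (h : ∀ w ∈ l, f w < U) (ha : a < U) : pvMaxFold f l a < U := by
  induction l generalizing a with
  | nil => simpa [pvMaxFold]
  | cons hd tl ih =>
    simp only [pvMaxFold, List.foldl_cons] at *
    split_ifs
    · exact ih _ (fun w hw => h w (List.mem_cons_of_mem _ hw)) (h hd List.mem_cons_self)
    · exact ih _ (fun w hw => h w (List.mem_cons_of_mem _ hw)) ha

lemma pvMaxFold_reach (f : String → Int) (l : List String) (a L : Int)
    (hub : ∀ w ∈ l, f w ≤ L) (hex : ∃ w ∈ l, f w = L) (ha : a ≤ L) :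
    pvMaxFold f l a = L := by
  induction l generalizing a with
  | nil => simp at hex
  | cons hd tl ih =>
    simp only [pvMaxFold, List.foldl_cons] at *
    obtain ⟨w, hw, hfw⟩ := hex
    have hub' : ∀ w ∈ tl, f w ≤ L := fun w hw => hub w (List.mem_cons_of_mem _ hw)
    rw [List.mem_cons] at hw
    rcases hw with hw | hw
    · subst hw
      by_cases htl : ∃ w ∈ tl, f w = L
      · split_ifs
        · exact ih _ hub' htl (by have := hub w List.mem_cons_self; omega)
        · exact ih _ hub' htl (by omega)
      · split_ifs with hgt
        · rw [hfw]; exact pvMaxFold_const f tl L hub'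
        · have haL : a = L := by have := hfw ▸ hgt; omega
          subst haL; exact pvMaxFold_const f tl a hub'
    · split_ifs
      · exact ih _ hub' ⟨w, hw, hfw⟩ (hub hd List.mem_cons_self)
      · exact ih _ hub' ⟨w, hw, hfw⟩ ha

lemma pvMaxFold_congr (f g : String → Int) (l : List String) (a : Int)
    (h : ∀ w ∈ l, f w = g w) : pvMaxFold f l a = pvMaxFold g l a := by
  induction l generalizing a with
  | nil => rfl
  | cons hd tl ih =>
    simp only [pvMaxFold, List.foldl_cons] at *
    rw [h hd List.mem_cons_self]
    exact ih _ (fun w hw => h w (List.mem_cons_of_mem _ hw))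

lemma pvEnumerate_snoc {α : Type} (xs : List α) (x : α) (s : Int) :
    PySem.List.enumerate (xs ++ [x]) s
      = PySem.List.enumerate xs s ++ [((s + xs.length : Int), x)] := by
  induction xs generalizing s with
  | nil => simp [PySem.List.enumerate_nil, PySem.List.enumerate_cons]
  | cons hd tl ih =>
    simp only [List.cons_append, PySem.List.enumerate_cons, ih, List.length_cons]
    have h : s + 1 + (tl.length : Int) = s + ((tl.length + 1 : Nat) : Int) := by push_cast; ring
    rw [h]

lemma pvPosIndex_snoc (xs : List String) (x : String) :
    pvPosIndex (xs ++ [x]) = (pvPosIndex xs).insert (pvHex x) (xs.length : Int) := by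
  unfold pvPosIndex
  rw [pvEnumerate_snoc, List.foldl_append]
  simp

lemma pvPosIndex_bound (xs : List String) (v : Int) :
    -1 ≤ (pvPosIndex xs).getD v (-1) ∧ (pvPosIndex xs).getD v (-1) < (xs.length : Int) := by
  induction xs using List.reverseRecOn with
  | nil => simp [pvPosIndex, PySem.List.enumerate_nil, PySem.Dict.getD_empty]
  | append_singleton xs x ih =>
    rw [pvPosIndex_snoc, PySem.Dict.getD_insert]
    simp only [List.length_append, List.length_cons, List.length_nil]
    split_ifs
    · refine ⟨by omega, by push_cast; omega⟩
    · obtain ⟨h1, h2⟩ := ih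
      refine ⟨h1, by push_cast; omega⟩

-- the core equivalence: A's reversed scan equals B's dict-index computation, for any best list
lemma pvCore (bw : List String) (xs : List String) :
    pvScanA xs.reverse (bw.map pvHex)
      = (if pvMaxFold (fun w => (pvPosIndex xs).getD (pvHex w) (-1)) bw (-1) ≥ 0
         then some (PySem.List.pyGetD xs (pvMaxFold (fun w => (pvPosIndex xs).getD (pvHex w) (-1)) bw (-1)) "")
         else none) := by
  induction xs using List.reverseRecOn with
  | nil =>
    have h0 : pvMaxFold (fun w => (pvPosIndex ([] : List String)).getD (pvHex w) (-1)) bw (-1) = -1 :=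
      pvMaxFold_const _ _ _ (fun w _ => by
        simp [pvPosIndex, PySem.List.enumerate_nil, PySem.Dict.getD_empty])
    simp [pvScanA, h0]
  | append_singleton xs x ih =>
    have hbound := fun v => pvPosIndex_bound xs v
    have hf' : ∀ w ∈ bw, (pvPosIndex (xs ++ [x])).getD (pvHex w) (-1)
        = if pvHex w = pvHex x then (xs.length : Int) else (pvPosIndex xs).getD (pvHex w) (-1) := by
      intro w _
      rw [pvPosIndex_snoc, PySem.Dict.getD_insert]
    rw [List.reverse_append]
    simp only [List.reverse_singleton, List.singleton_append]
    by_cases hc : ∃ w ∈ bw, pvHex w = pvHex x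
    · -- the new last element matches: both sides return x
      have hcontains : (bw.map pvHex).contains (pvHex x) = true := by
        obtain ⟨w, hw, hval⟩ := hc
        have : pvHex x ∈ bw.map pvHex := List.mem_map.mpr ⟨w, hw, hval⟩
        simpa using this
      have hmax : pvMaxFold (fun w => (pvPosIndex (xs ++ [x])).getD (pvHex w) (-1)) bw (-1)
          = (xs.length : Int) := by
        apply pvMaxFold_reach
        · intro w hw
          rw [hf' w hw]
          split_ifs
          · omega
          · have := (hbound (pvHex w)).2; omega
        · obtain ⟨w, hw, hval⟩ := hc
          exact ⟨w, hw, by rw [hf' w hw, if_pos hval]⟩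
        · omega
      rw [hmax]
      have hge : ((xs.length : Int) ≥ 0) := by omega
      simp only [pvScanA, hcontains, if_pos hge]
      rw [PySem.List.pyGetD_natCast]
      simp
    · -- no match on x: both sides fall through to the xs case
      have hc' : ∀ w ∈ bw, pvHex w ≠ pvHex x := by
        intro w hw hval
        exact hc ⟨w, hw, hval⟩
      have hcontains : (bw.map pvHex).contains (pvHex x) = false := by
        by_contra hne
        have : pvHex x ∈ bw.map pvHex := by
          simpa using Bool.of_not_eq_false hne
        obtain ⟨w, hw, hval⟩ := List.mem_map.mp this
        exact hc' w hw hval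
      have hmax : pvMaxFold (fun w => (pvPosIndex (xs ++ [x])).getD (pvHex w) (-1)) bw (-1)
          = pvMaxFold (fun w => (pvPosIndex xs).getD (pvHex w) (-1)) bw (-1) := by
        apply pvMaxFold_congr
        intro w hw
        rw [hf' w hw, if_neg (hc' w hw)]
      simp only [pvScanA, hcontains, Bool.false_eq_true, if_false, hmax, ih]
      set b := pvMaxFold (fun w => (pvPosIndex xs).getD (pvHex w) (-1)) bw (-1) with hb
      have hblt : b < (xs.length : Int) :=
        pvMaxFold_lt _ _ _ _ (fun w _ => (hbound (pvHex w)).2) (by omega)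
      split_ifs with hge
      · congr 1
        have h1 := PySem.List.pyGetD_eq_getElem (xs := xs) (d := "") (by omega : (0:Int) ≤ b)
          (by simpa using hblt)
        have h2 := PySem.List.pyGetD_eq_getElem (xs := xs ++ [x]) (d := "") (by omega : (0:Int) ≤ b)
          (by simp; omega)
        rw [h1, h2]
        exact (List.getElem_append_left (by omega)).symm
      · rfl

-- ===== VERDICT (by name: the statement is the Claim_ definition above) =====
theorem find_topmost_window_spec : Claim_equal_find_topmost_window := by
  intro bw ow _ _
  unfold Spec_find_topmost_window find_topmost_window find_topmost_window_alt
  split_ifs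
  · rfl
  · simp only [PySem.List.slice?_none_none_neg_one, Option.getD_some]
    exact pvCore bw ow
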